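-- pv_equiv track=rewrite | github.com/Terryobeyes/gamer-lottery | 抽獎程式(539).py | transform
-- ===== SOURCE A (Python) =====
-- def transform(sequence):
--     """
--     新的序列 Bn = An - 1 - count(An > Ai for i:1~n-1)
--     也就是原序列 -1 再減掉前面有幾個比他小的數
--     """
--     new = []
--     for i in range(5):
--         value = int(sequence[i]) - 1
--         for j in range(i):
--             if sequence[i] > sequence[j]:
--                 value -= 1
--         new.append(value)
--     return new
-- ===== SOURCE B (Python) =====
-- def transform(sequence):
--     """Same result as A: B_i = A_i - 1 - #(earlier strictly smaller), for i in 0..4.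
--     Instead of rescanning the prefix for every i, keep a sorted list `seen` of the
--     earlier elements and find the strictly-smaller count by binary search."""
--     new = []
--     seen = []
--     for i in range(5):
--         x = sequence[i]
--         lo, hi = 0, len(seen)
--         while lo < hi:                 # hand-written bisect_left (no imports in this module)
--             mid = (lo + hi) // 2
--             if seen[mid] < x:
--                 lo = mid + 1
--             else:
--                 hi = mid
--         new.append(int(x) - 1 - lo)
--         seen.insert(lo, x)
--     return new
-- ===== Notes on version B (the rewrite author's own statement) =====
-- stated objective: alternative
-- what changed: Replaces A's inner rescan of the prefix by a sorted running list of earlier elements with a hand-written binary search (bisect_left) giving the strictly-smaller count directly, inserting each element at its sorted position.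
import Mathlib
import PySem

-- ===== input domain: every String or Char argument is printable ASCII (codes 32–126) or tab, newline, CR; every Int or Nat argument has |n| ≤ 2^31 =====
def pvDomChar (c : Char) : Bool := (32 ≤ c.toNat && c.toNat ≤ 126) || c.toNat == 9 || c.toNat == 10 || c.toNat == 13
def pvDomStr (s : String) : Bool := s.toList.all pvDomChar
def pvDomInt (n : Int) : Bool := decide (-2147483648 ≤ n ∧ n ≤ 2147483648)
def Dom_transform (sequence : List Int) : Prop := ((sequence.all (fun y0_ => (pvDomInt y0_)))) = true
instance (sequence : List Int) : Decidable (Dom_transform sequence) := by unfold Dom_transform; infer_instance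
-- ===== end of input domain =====

-- B replaces A's inner rescan of the prefix by a sorted running list queried with bisect_left
-- (same answers; an alternative decomposition, not claimed faster at this fixed size 5).

-- ===== PORT A =====
def transform (sequence : List Int) : List Int :=
  (PySem.List.pyRange 0 5 1).foldl (fun new i =>
    let value : Int := PySem.List.pyGetD sequence i 0 - 1
    let value :=
      (PySem.List.pyRange 0 i 1).foldl
        (fun v j =>
          if PySem.List.pyGetD sequence i 0 > PySem.List.pyGetD sequence j 0 then v - 1 else v)
        value
    new ++ [value]) []

-- ===== PORT B =====
-- Source B's hand-written lo/hi binary-search loop is exactly bisect_left; it is ported as the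
-- prelude primitive PySem.List.bisectLeft (same loop, fuel-counted), list.insert as PySem.List.insert.
def transform_alt (sequence : List Int) : List Int :=
  ((PySem.List.pyRange 0 5 1).foldl (fun st i =>
      let x := PySem.List.pyGetD sequence i 0
      let lo := PySem.List.bisectLeft st.2 x
      (st.1 ++ [x - 1 - (lo : Int)], PySem.List.insert st.2 (lo : Int) x))
    (([], []) : List Int × List Int)).1

-- ===== PRECONDITION & SPEC =====
-- A indexes sequence[0..4] unconditionally, so it raises IndexError on lists shorter than 5
-- (and B's identical indexing raises there too): those inputs are excluded.
def Pre_transform (sequence : List Int) : Prop := 5 ≤ sequence.length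
instance (sequence : List Int) : Decidable (Pre_transform sequence) := by
  unfold Pre_transform; infer_instance
def pvWitness_transform : List Int := [3, 1, 4, 1, 5]
def Spec_transform (sequence : List Int) (out : List Int) : Prop := out = transform_alt sequence
instance (sequence : List Int) (out : List Int) : Decidable (Spec_transform sequence out) := by
  unfold Spec_transform; infer_instance

-- ===== CLAIM (what is proved, stated in full; the proofs are below) =====
def Claim_equal_transform : Prop :=
  ∀ (sequence : List Int), Dom_transform sequence → Pre_transform sequence →
    Spec_transform sequence (transform sequence)

-- ===== LEMMAS AND PROOFS =====

-- A's inner loop subtracts 1 for every earlier strictly-smaller element: it computes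
-- v0 - (number of elements of the length-n prefix that are < x).
lemma innerA_eq_countP (seq : List Int) (n : Nat) (hn : n ≤ seq.length) (x v0 : Int) :
    (PySem.List.pyRange 0 (n : Int) 1).foldl
        (fun v j => if x > PySem.List.pyGetD seq j 0 then v - 1 else v) v0
      = v0 - ((seq.take n).countP (fun y => decide (y < x)) : Int) := by
  induction n generalizing v0 with
  | zero => simp [PySem.List.pyRange_one_eq_nil]
  | succ m ih =>
    have hm : m < seq.length := by omega
    have hcast : ((m + 1 : Nat) : Int) = (m : Int) + 1 := by omega
    rw [hcast, PySem.List.pyRange_one_succ_right (by positivity), List.foldl_append,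
      ih (by omega), List.take_add_one]
    simp only [List.foldl_cons, List.foldl_nil, PySem.List.pyGetD_natCast,
      List.getD_eq_getElem?_getD, List.getElem?_eq_getElem hm]
    rw [List.countP_append]
    by_cases h : seq[m] < x
    · simp [h, gt_iff_lt]
      ring
    · simp [h, gt_iff_lt]

-- On a sorted list, bisect_left returns exactly the number of elements strictly below x.
lemma bisectLeft_eq_countP (seen : List Int) (x : Int)
    (hs : seen.Pairwise (· ≤ ·)) :
    PySem.List.bisectLeft seen x = seen.countP (fun y => decide (y < x)) := by
  obtain ⟨hle, hlt, hge⟩ := PySem.List.bisectLeft_spec seen x hs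
  set t := PySem.List.bisectLeft seen x with ht
  have h1 : (seen.take t).countP (fun y => decide (y < x)) = t := by
    have hlen : (seen.take t).length = t := by simp [List.length_take]; omega
    have hall : (seen.take t).countP (fun y => decide (y < x)) = (seen.take t).length :=
      List.countP_eq_length.mpr (by
        intro a ha
        obtain ⟨k, hk, hka⟩ := List.mem_iff_getElem.mp ha
        have hk' : k < t ∧ k < seen.length := by
          simp only [List.length_take] at hk; omega
        have hav : a = seen[k] := by rw [← hka]; exact List.getElem_take
        simpa [hav] using hlt k hk'.2 hk'.1)
    rw [hall, hlen]
  have h2 : (seen.drop t).countP (fun y => decide (y < x)) = 0 := by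
    rw [List.countP_eq_zero]
    intro a ha
    obtain ⟨k, hk, hka⟩ := List.mem_iff_getElem.mp ha
    have hk' : k < seen.length - t := by simpa [List.length_drop] using hk
    have hav : a = seen[t + k] := by rw [← hka]; exact List.getElem_drop
    have := hge (t + k) (by omega) (by omega)
    simp [hav]
    omega
  conv_rhs => rw [(List.take_append_drop t seen).symm, List.countP_append, h1, h2]
  omega

-- The running state of B's loop: sorted, and a permutation of the prefix consumed so far;
-- and the outputs of the two loops agree.
lemma loop_invariant (seq : List Int) (n : Nat) (hn : n ≤ seq.length) :
    (((PySem.List.pyRange 0 (n : Int) 1).foldl (fun st i =>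
        let x := PySem.List.pyGetD seq i 0
        let lo := PySem.List.bisectLeft st.2 x
        (st.1 ++ [x - 1 - (lo : Int)], PySem.List.insert st.2 (lo : Int) x))
      (([], []) : List Int × List Int)).2.Pairwise (· ≤ ·)) ∧
    (((PySem.List.pyRange 0 (n : Int) 1).foldl (fun st i =>
        let x := PySem.List.pyGetD seq i 0
        let lo := PySem.List.bisectLeft st.2 x
        (st.1 ++ [x - 1 - (lo : Int)], PySem.List.insert st.2 (lo : Int) x))
      (([], []) : List Int × List Int)).2.Perm (seq.take n)) ∧
    (((PySem.List.pyRange 0 (n : Int) 1).foldl (fun st i =>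
        let x := PySem.List.pyGetD seq i 0
        let lo := PySem.List.bisectLeft st.2 x
        (st.1 ++ [x - 1 - (lo : Int)], PySem.List.insert st.2 (lo : Int) x))
      (([], []) : List Int × List Int)).1
      = (PySem.List.pyRange 0 (n : Int) 1).foldl (fun new i =>
          let value : Int := PySem.List.pyGetD seq i 0 - 1
          let value :=
            (PySem.List.pyRange 0 i 1).foldl
              (fun v j =>
                if PySem.List.pyGetD seq i 0 > PySem.List.pyGetD seq j 0 then v - 1 else v)
              value
          new ++ [value]) []) := by
  induction n with
  | zero => simp [PySem.List.pyRange_one_eq_nil]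
  | succ m ih =>
    obtain ⟨hsort, hperm, hout⟩ := ih (by omega)
    have hm : m < seq.length := by omega
    have hcast : ((m + 1 : Nat) : Int) = (m : Int) + 1 := by omega
    rw [hcast, PySem.List.pyRange_one_succ_right (by positivity)]
    set F := (fun (st : List Int × List Int) (i : Int) =>
        let x := PySem.List.pyGetD seq i 0
        let lo := PySem.List.bisectLeft st.2 x
        (st.1 ++ [x - 1 - (lo : Int)], PySem.List.insert st.2 (lo : Int) x)) with hF
    set st := (PySem.List.pyRange 0 (m : Int) 1).foldl F (([], []) : List Int × List Int) with hst
    set x := PySem.List.pyGetD seq (m : Int) 0 with hx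
    have hxval : x = seq[m] := by
      simp [hx, PySem.List.pyGetD_natCast, List.getD_eq_getElem?_getD,
        List.getElem?_eq_getElem hm]
    set t := PySem.List.bisectLeft st.2 x with htdef
    have htc : t = st.2.countP (fun y => decide (y < x)) := bisectLeft_eq_countP _ _ hsort
    have htlen : t ≤ st.2.length := by
      rw [htc]; exact List.countP_le_length
    have hins : PySem.List.insert st.2 (t : Int) x = st.2.take t ++ x :: st.2.drop t :=
      PySem.List.insert_natCast _ _ _ htlen
    obtain ⟨_, hlt, hge⟩ := PySem.List.bisectLeft_spec st.2 x hsort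
    constructor
    · -- sortedness of the new seen
      rw [List.foldl_append, List.foldl_cons, List.foldl_nil, ← hst, hF]
      simp only [← hx, ← htdef]
      rw [hins, List.pairwise_append]
      refine ⟨hsort.sublist (List.take_sublist _ _), ?_, ?_⟩
      · rw [List.pairwise_cons]
        refine ⟨?_, hsort.sublist (List.drop_sublist _ _)⟩
        intro a ha
        obtain ⟨k, hk, hka⟩ := List.mem_iff_getElem.mp ha
        have hk' : k < st.2.length - t := by simpa [List.length_drop] using hk
        have hav : a = st.2[t + k] := by rw [← hka]; exact List.getElem_drop
        exact hav ▸ hge (t + k) (by omega) (by omega)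
      · intro a ha b hb
        obtain ⟨k, hk, hka⟩ := List.mem_iff_getElem.mp ha
        have hk' : k < t ∧ k < st.2.length := by
          simp only [List.length_take] at hk; omega
        have hax : a = st.2[k] := by rw [← hka]; exact List.getElem_take
        have halt : a < x := hax ▸ hlt k hk'.2 hk'.1
        rcases List.mem_cons.mp hb with rfl | hb'
        · exact le_of_lt halt
        · obtain ⟨k2, hk2, hkb⟩ := List.mem_iff_getElem.mp hb'
          have hk2' : k2 < st.2.length - t := by simpa [List.length_drop] using hk2
          have hbx : b = st.2[t + k2] := by rw [← hkb]; exact List.getElem_drop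
          have : x ≤ b := hbx ▸ hge (t + k2) (by omega) (by omega)
          exact le_of_lt (lt_of_lt_of_le halt this)
    constructor
    · -- permutation with the prefix
      rw [List.foldl_append, List.foldl_cons, List.foldl_nil, ← hst, hF]
      simp only [← hx, ← htdef]
      rw [hins, List.take_add_one, List.getElem?_eq_getElem hm]
      have h1 : (st.2.take t ++ x :: st.2.drop t).Perm (x :: st.2) := by
        have := List.perm_middle (a := x) (l₁ := st.2.take t) (l₂ := st.2.drop t)
        simpa [List.take_append_drop] using this
      have h2 : (x :: st.2).Perm (x :: seq.take m) := hperm.cons x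
      have h3 : (x :: seq.take m).Perm (seq.take m ++ [seq[m]]) := by
        rw [hxval]
        exact (List.perm_append_singleton _ _).symm
      exact (h1.trans h2).trans h3
    · -- heads agree
      rw [List.foldl_append, List.foldl_cons, List.foldl_nil, ← hst, hF,
        List.foldl_append, List.foldl_cons, List.foldl_nil]
      simp only [← hx, ← htdef]
      rw [hout, innerA_eq_countP seq m (by omega) x (x - 1), htc,
        (hperm.countP_eq (fun y => decide (y < x)))]

-- ===== VERDICT (by name: the statement is the Claim_ definition above) =====
theorem transform_spec : Claim_equal_transform := by
  intro sequence _ hpre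
  unfold Spec_transform transform transform_alt
  have h := (loop_invariant sequence 5 hpre).2.2
  have : ((5 : Nat) : Int) = (5 : Int) := by norm_num
  rw [← this] at *
  exact h.symm
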